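-- pv_equiv track=rewrite | github.com/konggogi4626/CodingTest | Ch3/q2.py | solution
-- ===== SOURCE A (Python) =====
-- def solution(n,m,k,data:list) -> int:
--     data.sort() # 정렬, 마지막 인덱스
--     first_large = data[n-1]
--     second_large = data[n-2]
--     sol = 0
--     tmp_k = k
--     while(m>0):
--         if(tmp_k>0):
--             sol+=first_large
--             tmp_k -=1
--         else:
--             sol+=second_large
--             tmp_k=k
--         m-=1
--     return sol
-- ===== SOURCE B (Python) =====
-- def solution(n, m, k, data: list) -> int:
--     # Closed form: picks come in blocks of (k+1): k firsts then one second.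
--     # Note: like A, this sorts `data` in place (same observable mutation).
--     data.sort()
--     first_large = data[n - 1]
--     second_large = data[n - 2]
--     if m <= 0:
--         return 0
--     if k <= 0:
--         return m * second_large
--     q = m // (k + 1)          # number of 'second' picks
--     return (m - q) * first_large + q * second_large
-- ===== Notes on version B (the rewrite author's own statement) =====
-- stated objective: simpler
-- what changed: Replaced the pick-by-pick while loop with a closed-form block count: picks come in blocks of k+1 (k firsts then one second), so q = m//(k+1) seconds and m-q firsts, computed directly after the sort.
import Mathlib
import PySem

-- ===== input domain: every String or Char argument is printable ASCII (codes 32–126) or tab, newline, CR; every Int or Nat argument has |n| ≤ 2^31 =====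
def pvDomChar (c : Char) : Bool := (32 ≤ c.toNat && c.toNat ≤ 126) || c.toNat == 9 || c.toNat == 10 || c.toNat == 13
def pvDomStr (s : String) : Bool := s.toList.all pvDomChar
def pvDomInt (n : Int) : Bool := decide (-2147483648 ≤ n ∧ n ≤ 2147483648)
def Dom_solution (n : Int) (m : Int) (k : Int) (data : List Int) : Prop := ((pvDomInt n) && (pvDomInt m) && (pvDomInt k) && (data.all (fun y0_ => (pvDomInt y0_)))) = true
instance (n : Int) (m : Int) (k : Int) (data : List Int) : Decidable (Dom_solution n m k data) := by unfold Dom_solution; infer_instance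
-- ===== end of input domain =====

-- B replaces A's pick-by-pick while loop with a closed-form block count (q = m // (k+1) second picks); simpler.
-- Both Pythons sort `data` in place; the equivalence proved here is about the return value.

-- ===== PORT A =====
-- the while(m>0) loop; fuel = remaining m as a Nat, state (tmp_k, sol)
def solutionLoopA (first second k : Int) : Nat → Int → Int → Int
  | 0, _, sol => sol
  | Nat.succ m', tmp_k, sol =>
      if tmp_k > 0 then solutionLoopA first second k m' (tmp_k - 1) (sol + first)
      else solutionLoopA first second k m' k (sol + second)

def solution (n : Int) (m : Int) (k : Int) (data : List Int) : Int :=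
  let d := PySem.List.sorted data (fun x => x) false
  match PySem.List.pyGet? d (n - 1), PySem.List.pyGet? d (n - 2) with
  | some first_large, some second_large =>
      solutionLoopA first_large second_large k m.toNat k 0
  | _, _ => 0    -- IndexError in Python; excluded by Pre_solution

-- ===== PORT B =====
def solution_alt (n : Int) (m : Int) (k : Int) (data : List Int) : Int :=
  let d := PySem.List.sorted data (fun x => x) false
  ((PySem.List.pyGet? d (n - 1)).elim 0 (fun first_large =>
    (PySem.List.pyGet? d (n - 2)).elim 0 (fun second_large =>
      if m ≤ 0 then 0
      else if k ≤ 0 then m * second_large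
      else
        let q := PySem.Int.floordiv m (k + 1)
        (m - q) * first_large + q * second_large)))    -- none = IndexError in Python; excluded by Pre_solution

-- ===== PRECONDITION & SPEC =====
-- Pre_ excludes exactly the inputs where data[n-1] or data[n-2] raises IndexError (both A and B raise there).
def Pre_solution (n : Int) (m : Int) (k : Int) (data : List Int) : Prop :=
  PySem.Raise.InRange data.length (n - 1) ∧ PySem.Raise.InRange data.length (n - 2)
instance (n : Int) (m : Int) (k : Int) (data : List Int) : Decidable (Pre_solution n m k data) := by unfold Pre_solution; infer_instance

def pvWitness_solution : Int × Int × Int × List Int := (3, 8, 2, [1, 5, 3])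

def Spec_solution (n : Int) (m : Int) (k : Int) (data : List Int) (out : Int) : Prop := out = solution_alt n m k data
instance (n : Int) (m : Int) (k : Int) (data : List Int) (out : Int) : Decidable (Spec_solution n m k data out) := by unfold Spec_solution; infer_instance

-- ===== CLAIM (what is proved, stated in full; the proofs are below) =====
def Claim_equal_solution : Prop := ∀ (n : Int) (m : Int) (k : Int) (data : List Int), Dom_solution n m k data → Pre_solution n m k data → Spec_solution n m k data (solution n m k data)

-- ===== LEMMAS AND PROOFS =====

-- number of 'second' picks the loop makes in `m` steps starting with counter `tmp` (reset value `kn`)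
def secsCount (kn : Nat) : Nat → Nat → Nat
  | 0, _ => 0
  | Nat.succ m', tmp => if tmp > 0 then secsCount kn m' (tmp - 1) else secsCount kn m' kn + 1

lemma secsCount_closed (kn : Nat) : ∀ (m tmp : Nat), tmp ≤ kn →
    secsCount kn m tmp = (m + kn - tmp) / (kn + 1) := by
  intro m
  induction m with
  | zero =>
      intro tmp h
      simp [secsCount, Nat.div_eq_of_lt (by omega : kn - tmp < kn + 1)]
  | succ m' ih =>
      intro tmp h
      by_cases ht : tmp > 0
      · have := ih (tmp - 1) (by omega)
        simp only [secsCount, if_pos ht, this]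
        congr 1; omega
      · have h0 : tmp = 0 := by omega
        subst h0
        simp only [secsCount, if_neg ht, ih kn (le_refl _), Nat.add_sub_cancel]
        rw [show m' + 1 + kn - 0 = m' + (kn + 1) by omega, Nat.add_div_right _ (by omega)]

-- k ≤ 0: every pick is a 'second' pick
lemma loopA_nonpos (f s k : Int) (hk : k ≤ 0) : ∀ (m : Nat) (tmp sol : Int), tmp ≤ 0 →
    solutionLoopA f s k m tmp sol = sol + (m : Int) * s := by
  intro m
  induction m with
  | zero => intro tmp sol _; simp [solutionLoopA]
  | succ m' ih =>
      intro tmp sol ht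
      rw [solutionLoopA, if_neg (by omega), ih k (sol + s) hk]
      push_cast; ring

-- k > 0: the loop sums (m - secs) firsts and secs seconds
lemma loopA_pos (f s k : Int) (hk : 0 < k) : ∀ (m : Nat) (tmpN : Nat) (sol : Int), tmpN ≤ k.toNat →
    solutionLoopA f s k m (tmpN : Int) sol
      = sol + ((m : Int) - (secsCount k.toNat m tmpN : Int)) * f + (secsCount k.toNat m tmpN : Int) * s := by
  intro m
  induction m with
  | zero => intro tmpN sol _; simp [solutionLoopA, secsCount]
  | succ m' ih =>
      intro tmpN sol htmp
      have hc : ((k.toNat : Nat) : Int) = k := Int.toNat_of_nonneg hk.le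
      by_cases ht : tmpN > 0
      · have hstep : ((tmpN : Int) - 1) = ((tmpN - 1 : Nat) : Int) := by omega
        rw [solutionLoopA, if_pos (by exact_mod_cast ht), hstep,
            ih (tmpN - 1) (sol + f) (by omega)]
        simp only [secsCount, if_pos ht]
        push_cast; ring
      · have h0 : tmpN = 0 := by omega
        have ih' := ih k.toNat (sol + s) (le_refl _)
        rw [hc] at ih'
        rw [solutionLoopA, if_neg (by omega), ih']
        simp only [secsCount, h0]
        push_cast; ring

-- ===== VERDICT (by name: the statement is the Claim_ definition above) =====
theorem solution_spec : Claim_equal_solution := by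
  intro n m k data _ hpre
  unfold Spec_solution solution solution_alt
  have h1 : PySem.Raise.InRange (PySem.List.sorted data (fun x => x) false).length (n - 1) := by
    rw [PySem.List.length_sorted]; exact hpre.1
  have h2 : PySem.Raise.InRange (PySem.List.sorted data (fun x => x) false).length (n - 2) := by
    rw [PySem.List.length_sorted]; exact hpre.2
  obtain ⟨f, hf⟩ := Option.isSome_iff_exists.mp (by
    rw [Option.isSome_iff_ne_none]
    intro hc; exact absurd ((PySem.List.pyGet?_eq_none_iff _ _).mp hc) (not_not_intro h1))
  obtain ⟨s, hs⟩ := Option.isSome_iff_exists.mp (by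
    rw [Option.isSome_iff_ne_none]
    intro hc; exact absurd ((PySem.List.pyGet?_eq_none_iff _ _).mp hc) (not_not_intro h2))
  simp only [hf, hs, Option.elim]
  by_cases hm : m ≤ 0
  · have : m.toNat = 0 := by omega
    rw [if_pos hm, this]; simp [solutionLoopA]
  · rw [if_neg hm]
    by_cases hk : k ≤ 0
    · rw [if_pos hk, loopA_nonpos f s k hk m.toNat k 0 hk]
      have : ((m.toNat : Nat) : Int) = m := by omega
      rw [this]; ring
    · rw [if_neg hk]
      have hk' : 0 < k := by omega
      have hc : ((k.toNat : Nat) : Int) = k := Int.toNat_of_nonneg hk'.le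
      have hmain := loopA_pos f s k hk' m.toNat k.toNat 0 (le_refl _)
      rw [hc, secsCount_closed k.toNat m.toNat k.toNat (le_refl _), Nat.add_sub_cancel] at hmain
      rw [hmain]
      have hq : PySem.Int.floordiv m (k + 1) = ((m.toNat / (k.toNat + 1) : Nat) : Int) := by
        rw [PySem.Int.floordiv_eq_ediv_of_pos (by omega),
            show (m : Int) = ((m.toNat : Nat) : Int) by omega,
            show k + 1 = (((k.toNat + 1 : Nat)) : Int) by omega]
        exact_mod_cast rfl
      rw [hq]
      have hm' : ((m.toNat : Nat) : Int) = m := by omega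
      rw [hm']; ring
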